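-- pv_equiv track=rewrite | github.com/404PageOrganization/annual-project | image_preprocessing.py | extract_peek
-- ===== SOURCE A (Python) =====
-- def extract_peek(array_vals, val_min, range_min):
--     # extract the peek of the projection
--     i_start = None
--     i_end = None
--     peek_ranges = []
--     for i, val in enumerate(array_vals):
--         if val > val_min and i_start is None:
--             i_start = i
--         elif val < val_min and i_start is not None:
--             if i - i_start >= range_min:
--                 i_end = i
--                 peek_ranges.append((i_start, i_end))
--                 i_start = None
--                 i_end = None
--     return peek_ranges
-- ===== SOURCE B (Python) =====
-- def extract_peek(array_vals, val_min, range_min):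
--     # Event-list approach: precompute the sorted index lists of strictly-above and
--     # strictly-below samples, then pair them up by merging the two lists.
--     ups = [i for i, v in enumerate(array_vals) if v > val_min]
--     downs = [i for i, v in enumerate(array_vals) if v < val_min]
--     res = []
--     u = 0
--     d = 0
--     while u < len(ups):
--         start = ups[u]
--         while d < len(downs) and (downs[d] <= start or downs[d] - start < range_min):
--             d += 1
--         if d == len(downs):
--             break
--         end = downs[d]
--         res.append((start, end))
--         while u < len(ups) and ups[u] <= end:
--             u += 1
--         d += 1
--     return res
-- ===== Notes on version B (the rewrite author's own statement) =====
-- stated objective: alternative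
-- what changed: Replaces A's single stateful scan (optional start carried through one enumerate loop) by an event-list algorithm: two comprehensions first build the sorted index lists of strictly-above and strictly-below samples, and a two-pointer merge of those lists then emits the (start, end) pairs.
import Mathlib
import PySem

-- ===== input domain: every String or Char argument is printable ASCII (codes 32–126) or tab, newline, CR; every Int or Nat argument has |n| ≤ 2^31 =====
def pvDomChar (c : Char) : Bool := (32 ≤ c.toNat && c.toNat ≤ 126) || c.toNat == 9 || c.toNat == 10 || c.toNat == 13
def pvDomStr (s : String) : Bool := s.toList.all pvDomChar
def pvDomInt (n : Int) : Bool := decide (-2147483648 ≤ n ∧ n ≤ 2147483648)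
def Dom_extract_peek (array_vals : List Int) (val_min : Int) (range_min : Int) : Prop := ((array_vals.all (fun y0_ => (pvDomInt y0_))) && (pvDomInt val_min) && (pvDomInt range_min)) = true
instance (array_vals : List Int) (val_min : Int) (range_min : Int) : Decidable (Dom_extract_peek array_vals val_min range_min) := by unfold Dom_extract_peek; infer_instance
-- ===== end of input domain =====

-- B replaces A's single stateful scan by an event-list algorithm: it first builds the
-- sorted index lists of strictly-above and strictly-below samples, then pairs them by
-- merging the two lists; same O(n) cost, return value proved identical.

-- ===== PORT A =====
-- the for-loop over enumerate(array_vals), carrying (i, i_start, peek_ranges)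
def peekLoopA (vmin rmin : Int) : List Int → Nat → Option Nat → List (Int × Int) → List (Int × Int)
  | [], _, _, acc => acc
  | v :: rest, i, st, acc =>
    if v > vmin ∧ st = none then
      peekLoopA vmin rmin rest (i + 1) (some i) acc
    else if v < vmin ∧ st ≠ none then
      match st with
      | some s =>
        if (i : Int) - (s : Int) ≥ rmin then
          peekLoopA vmin rmin rest (i + 1) none (acc ++ [((s : Int), (i : Int))])
        else
          peekLoopA vmin rmin rest (i + 1) (some s) acc
      | none => peekLoopA vmin rmin rest (i + 1) none acc
    else
      peekLoopA vmin rmin rest (i + 1) st acc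

def extract_peek (array_vals : List Int) (val_min : Int) (range_min : Int) : List (Int × Int) :=
  peekLoopA val_min range_min array_vals 0 none []

-- ===== PORT B =====
-- [i for i, v in enumerate(array_vals) if p(v)]
def compIdx (p : Int → Bool) (xs : List Int) : List Int :=
  ((xs.zipIdx).filter (fun q => p q.1)).map (fun q => (q.2 : Int))

-- the inner `while d < len(downs) and (downs[d] <= start or downs[d] - start < range_min)` pointer advance
def skipDowns (start rmin : Int) : List Int → List Int
  | [] => []
  | d :: ds => if d ≤ start ∨ d - start < rmin then skipDowns start rmin ds else d :: ds

-- the inner `while u < len(ups) and ups[u] <= end` pointer advance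
def skipUps (e : Int) : List Int → List Int
  | [] => []
  | u :: us => if u ≤ e then skipUps e us else u :: us

theorem skipUps_length_le (e : Int) (l : List Int) : (skipUps e l).length ≤ l.length := by
  induction l with
  | nil => simp [skipUps]
  | cons u us ih => simp only [skipUps]; split <;> simp <;> omega

theorem skipDowns_head_gt (s r : Int) (ds e : _) (ds' : List Int)
    (h : skipDowns s r ds = e :: ds') : s < e := by
  induction ds with
  | nil => simp [skipDowns] at h
  | cons d dd ih =>
    simp only [skipDowns] at h
    split at h
    · exact ih h
    · rename_i hc
      cases h; omega

-- the outer `while u < len(ups)` merge of the two index lists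
def mergeB (rmin : Int) : List Int → List Int → List (Int × Int)
  | [], _ => []
  | u :: us, ds =>
    match h : skipDowns u rmin ds with
    | [] => []
    | e :: ds' => (u, e) :: mergeB rmin (skipUps e (u :: us)) ds'
termination_by ups _ => ups.length
decreasing_by
  have he := skipDowns_head_gt u rmin ds e ds' h
  have : skipUps e (u :: us) = skipUps e us := by
    simp only [skipUps]; rw [if_pos (by omega)]
  rw [this]
  have := skipUps_length_le e us
  simp; omega

def extract_peek_alt (array_vals : List Int) (val_min : Int) (range_min : Int) : List (Int × Int) :=
  mergeB range_min (compIdx (fun v => v > val_min) array_vals) (compIdx (fun v => v < val_min) array_vals)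

-- ===== PRECONDITION & SPEC =====
def Spec_extract_peek (array_vals : List Int) (val_min : Int) (range_min : Int) (out : List (Int × Int)) : Prop := out = extract_peek_alt array_vals val_min range_min
instance (array_vals : List Int) (val_min : Int) (range_min : Int) (out : List (Int × Int)) : Decidable (Spec_extract_peek array_vals val_min range_min out) := by unfold Spec_extract_peek; infer_instance

-- ===== CLAIM (what is proved, stated in full; the proofs are below) =====
def Claim_equal_extract_peek : Prop := ∀ (array_vals : List Int) (val_min : Int) (range_min : Int), Dom_extract_peek array_vals val_min range_min → Spec_extract_peek array_vals val_min range_min (extract_peek array_vals val_min range_min)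

-- ===== LEMMAS AND PROOFS =====

-- proof-side recursive characterisation of compIdx restricted to suffixes
def idxP (p : Int → Bool) (xs : List Int) (i : Nat) : List Int :=
  if h : i < xs.length then
    if p xs[i] then (i : Int) :: idxP p xs (i + 1) else idxP p xs (i + 1)
  else []
termination_by xs.length - i

theorem idxP_mem (p : Int → Bool) (xs : List Int) :
    ∀ i j, j ∈ idxP p xs i → (i : Int) ≤ j := by
  intro i
  fun_induction idxP p xs i with
  | case1 i h hp ih =>
    intro j hj
    rw [List.mem_cons] at hj
    rcases hj with rfl | hj
    · omega
    · have := ih j hj; omega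
  | case2 i h hp ih =>
    intro j hj; have := ih j hj; omega
  | case3 => intro j hj; simp at hj

theorem compIdx_eq_idxP (p : Int → Bool) (xs : List Int) :
    ∀ k i, xs.length - i = k →
    (((xs.drop i).zipIdx i).filter (fun q => p q.1)).map (fun q => ((q.2 : Nat) : Int)) = idxP p xs i := by
  intro k
  induction k with
  | zero =>
    intro i hk
    have hi : xs.length ≤ i := by omega
    rw [List.drop_eq_nil_of_le hi, idxP]
    simp [Nat.not_lt.mpr hi]
  | succ k ih =>
    intro i hk
    have hi : i < xs.length := by omega
    rw [List.drop_eq_getElem_cons hi, List.zipIdx_cons, idxP, dif_pos hi]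
    by_cases hp : p xs[i]
    · simp only [List.filter_cons, hp, if_pos, List.map_cons]
      rw [ih (i + 1) (by omega)]
    · simp only [List.filter_cons, hp]
      simpa using ih (i + 1) (by omega)

theorem skipDowns_mem (s r : Int) :
    ∀ (ds : List Int) (e : Int) (ds' : List Int), skipDowns s r ds = e :: ds' → e ∈ ds := by
  intro ds
  induction ds with
  | nil => intro e ds' h; simp [skipDowns] at h
  | cons d dd ih =>
    intro e ds' h
    simp only [skipDowns] at h
    split at h
    · exact List.mem_cons_of_mem _ (ih e ds' h)
    · cases h; exact List.mem_cons_self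
  
theorem skipUps_of_all_gt (e : Int) (l : List Int) (h : ∀ u ∈ l, e < u) : skipUps e l = l := by
  cases l with
  | nil => rfl
  | cons u us =>
    have := h u List.mem_cons_self
    simp only [skipUps]
    rw [if_neg (by omega)]

-- equation lemmas for mergeB and for the "open peak" continuation closeB
theorem mergeB_nil2 (rmin u : Int) (us ds : List Int) (h : skipDowns u rmin ds = []) :
    mergeB rmin (u :: us) ds = [] := by
  rw [mergeB]
  split
  · rfl
  · rename_i e' ds'' heq; rw [h] at heq; cases heq

theorem mergeB_cons (rmin u : Int) (us ds : List Int) (e : Int) (ds' : List Int)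
    (h : skipDowns u rmin ds = e :: ds') :
    mergeB rmin (u :: us) ds = (u, e) :: mergeB rmin (skipUps e (u :: us)) ds' := by
  rw [mergeB]
  split
  · rename_i heq; rw [h] at heq; cases heq
  · rename_i e' ds'' heq; rw [h] at heq; cases heq; rfl

-- after emitting a peak, B's remaining work when in the "open peak at s" state
def closeB (rmin : Int) (s : Int) (ups ds : List Int) : List (Int × Int) :=
  match skipDowns s rmin ds with
  | [] => []
  | e :: ds' => (s, e) :: mergeB rmin (skipUps e ups) ds'

theorem closeB_nil (rmin s : Int) (ups ds : List Int) (h : skipDowns s rmin ds = []) :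
    closeB rmin s ups ds = [] := by
  unfold closeB; rw [h]

theorem closeB_cons (rmin s : Int) (ups ds : List Int) (e : Int) (ds' : List Int)
    (h : skipDowns s rmin ds = e :: ds') :
    closeB rmin s ups ds = (s, e) :: mergeB rmin (skipUps e ups) ds' := by
  unfold closeB; rw [h]

theorem skipUps_cons_drop (e u : Int) (us : List Int) (h : u ≤ e) :
    skipUps e (u :: us) = skipUps e us := by
  simp only [skipUps]; rw [if_pos h]

theorem key (xs : List Int) (vmin rmin : Int) :
    ∀ k i acc, xs.length - i = k →
      (peekLoopA vmin rmin (xs.drop i) i none acc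
        = acc ++ mergeB rmin (idxP (fun v => v > vmin) xs i) (idxP (fun v => v < vmin) xs i)) ∧
      (∀ s : Nat, s < i → peekLoopA vmin rmin (xs.drop i) i (some s) acc
        = acc ++ closeB rmin (s : Int) (idxP (fun v => v > vmin) xs i) (idxP (fun v => v < vmin) xs i)) := by
  intro k
  induction k with
  | zero =>
    intro i acc hk
    have hi : xs.length ≤ i := by omega
    have hdrop : xs.drop i = [] := List.drop_eq_nil_of_le hi
    have hA : idxP (fun v => v > vmin) xs i = [] := by rw [idxP]; simp [Nat.not_lt.mpr hi]
    have hB : idxP (fun v => v < vmin) xs i = [] := by rw [idxP]; simp [Nat.not_lt.mpr hi]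
    rw [hdrop, hA, hB]
    exact ⟨by simp [peekLoopA, mergeB], fun s _ => by simp [peekLoopA, closeB, skipDowns]⟩
  | succ k ih =>
    intro i acc hk
    have hi : i < xs.length := by omega
    have hk' : xs.length - (i + 1) = k := by omega
    have hdrop : xs.drop i = xs[i] :: xs.drop (i + 1) := List.drop_eq_getElem_cons hi
    have hUi : idxP (fun v => v > vmin) xs i
        = if xs[i] > vmin then (i : Int) :: idxP (fun v => v > vmin) xs (i + 1)
          else idxP (fun v => v > vmin) xs (i + 1) := by
      rw [idxP, dif_pos hi]; simp
    have hDi : idxP (fun v => v < vmin) xs i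
        = if xs[i] < vmin then (i : Int) :: idxP (fun v => v < vmin) xs (i + 1)
          else idxP (fun v => v < vmin) xs (i + 1) := by
      rw [idxP, dif_pos hi]; simp
    have memU : ∀ j ∈ idxP (fun v => v > vmin) xs (i + 1), ((i : Int) + 1) ≤ j := by
      intro j hj; have := idxP_mem _ xs (i + 1) j hj; omega
    have memD : ∀ j ∈ idxP (fun v => v < vmin) xs (i + 1), ((i : Int) + 1) ≤ j := by
      intro j hj; have := idxP_mem _ xs (i + 1) j hj; omega
    constructor
    · -- state none at index i
      by_cases hv : xs[i] > vmin
      · -- a start is found at i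
        have hA1 : peekLoopA vmin rmin (xs.drop i) i none acc
            = peekLoopA vmin rmin (xs.drop (i + 1)) (i + 1) (some i) acc := by
          rw [hdrop]; simp [peekLoopA, hv]
        rw [hA1, (ih (i + 1) acc hk').2 i (by omega)]
        have hnb : ¬ (xs[i] < vmin) := by omega
        rw [hUi, if_pos hv, hDi, if_neg hnb]
        congr 1
        cases hsd : skipDowns (i : Int) rmin (idxP (fun v => v < vmin) xs (i + 1)) with
        | nil =>
          rw [closeB_nil _ _ _ _ hsd, mergeB_nil2 _ _ _ _ hsd]
        | cons e ds' =>
          have hgt := skipDowns_head_gt _ _ _ _ _ hsd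
          rw [closeB_cons _ _ _ _ _ _ hsd, mergeB_cons _ _ _ _ _ _ hsd,
              skipUps_cons_drop _ _ _ (by omega)]
      · -- no start at i: both sides skip index i
        have hA1 : peekLoopA vmin rmin (xs.drop i) i none acc
            = peekLoopA vmin rmin (xs.drop (i + 1)) (i + 1) none acc := by
          rw [hdrop]; simp [peekLoopA, hv]
        rw [hA1, (ih (i + 1) acc hk').1, hUi, if_neg hv]
        congr 1
        by_cases hb : xs[i] < vmin
        · rw [hDi, if_pos hb]
          cases hU : idxP (fun v => v > vmin) xs (i + 1) with
          | nil => rw [mergeB, mergeB]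
          | cons u us =>
            have hu : (i : Int) ≤ u := by
              have := memU u (by rw [hU]; exact List.mem_cons_self); omega
            have hsd : skipDowns u rmin ((i : Int) :: idxP (fun v => v < vmin) xs (i + 1))
                = skipDowns u rmin (idxP (fun v => v < vmin) xs (i + 1)) := by
              simp only [skipDowns]; rw [if_pos (Or.inl hu)]
            cases hsd2 : skipDowns u rmin (idxP (fun v => v < vmin) xs (i + 1)) with
            | nil =>
              rw [mergeB_nil2 _ _ _ _ (hsd.trans hsd2), mergeB_nil2 _ _ _ _ hsd2]
            | cons e ds' =>
              rw [mergeB_cons _ _ _ _ _ _ (hsd.trans hsd2), mergeB_cons _ _ _ _ _ _ hsd2]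
        · rw [hDi, if_neg hb]
    · -- state some s at index i
      intro s hs
      by_cases hb : xs[i] < vmin
      · have hlt : ¬ (xs[i] > vmin) := by omega
        by_cases hr : (i : Int) - (s : Int) ≥ rmin
        · -- the peak closes at i
          have hA1 : peekLoopA vmin rmin (xs.drop i) i (some s) acc
              = peekLoopA vmin rmin (xs.drop (i + 1)) (i + 1) none (acc ++ [((s : Int), (i : Int))]) := by
            rw [hdrop]
            simp only [peekLoopA, hlt, false_and, if_neg, hb, true_and, ne_eq,
              reduceCtorEq, not_false_eq_true, if_pos, hr]
          rw [hA1, (ih (i + 1) (acc ++ [((s : Int), (i : Int))]) hk').1]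
          rw [hUi, if_neg hlt, hDi, if_pos hb]
          have hsd : skipDowns (s : Int) rmin ((i : Int) :: idxP (fun v => v < vmin) xs (i + 1))
              = (i : Int) :: idxP (fun v => v < vmin) xs (i + 1) := by
            simp only [skipDowns]
            rw [if_neg (by omega)]
          rw [closeB_cons _ _ _ _ _ _ hsd,
              skipUps_of_all_gt _ _ (fun u hu => by have := memU u hu; omega)]
          simp
        · -- dip too short: state unchanged
          have hA1 : peekLoopA vmin rmin (xs.drop i) i (some s) acc
              = peekLoopA vmin rmin (xs.drop (i + 1)) (i + 1) (some s) acc := by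
            rw [hdrop]
            simp only [peekLoopA, hlt, false_and, if_neg, hb, true_and, ne_eq,
              reduceCtorEq, not_false_eq_true, if_pos, hr]
          rw [hA1, (ih (i + 1) acc hk').2 s (by omega)]
          rw [hUi, if_neg hlt, hDi, if_pos hb]
          congr 1
          have hsd : skipDowns (s : Int) rmin ((i : Int) :: idxP (fun v => v < vmin) xs (i + 1))
              = skipDowns (s : Int) rmin (idxP (fun v => v < vmin) xs (i + 1)) := by
            simp only [skipDowns]; rw [if_pos (Or.inr (by omega))]
          unfold closeB
          rw [hsd]
      · -- value not below threshold: keep scanning for the close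
        have hA1 : peekLoopA vmin rmin (xs.drop i) i (some s) acc
            = peekLoopA vmin rmin (xs.drop (i + 1)) (i + 1) (some s) acc := by
          rw [hdrop]
          by_cases hv : xs[i] > vmin
          · simp [peekLoopA, hv, hb]
          · simp [peekLoopA, hv, hb]
        rw [hA1, (ih (i + 1) acc hk').2 s (by omega)]
        rw [hDi, if_neg hb]
        congr 1
        cases hsd : skipDowns (s : Int) rmin (idxP (fun v => v < vmin) xs (i + 1)) with
        | nil =>
          rw [closeB_nil _ _ _ _ hsd, closeB_nil _ _ _ _ hsd]
        | cons e ds' =>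
          have hmem := skipDowns_mem _ _ _ _ _ hsd
          have he : ((i : Int) + 1) ≤ e := memD e hmem
          rw [closeB_cons _ _ _ _ _ _ hsd, closeB_cons _ _ _ _ _ _ hsd, hUi]
          by_cases hv : xs[i] > vmin
          · rw [if_pos hv, skipUps_cons_drop _ _ _ (by omega)]
          · rw [if_neg hv]

-- ===== VERDICT (by name: the statement is the Claim_ definition above) =====
theorem extract_peek_spec : Claim_equal_extract_peek := by
  intro xs vmin rmin _
  unfold Spec_extract_peek extract_peek extract_peek_alt compIdx
  have h := (key xs vmin rmin (xs.length - 0) 0 [] rfl).1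
  simp only [List.drop_zero] at h
  rw [show xs.zipIdx = (xs.drop 0).zipIdx 0 by simp]
  rw [compIdx_eq_idxP (fun v => v > vmin) xs (xs.length - 0) 0 rfl,
      compIdx_eq_idxP (fun v => v < vmin) xs (xs.length - 0) 0 rfl]
  simpa using h
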